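-- pv_equiv track=rewrite | github.com/iwabuchi404/duckflow | companion/utils/preprocessor.py | _remove_preamble
-- ===== SOURCE A (Python) =====
-- def _remove_preamble(text: str) -> str:
--     """
--     Remove text before first protocol marker
--     Handles: "Sure! Here's...", "I'll help you..."
--     """
--     # Protocol start markers
--     markers = ['>>', '::', '<<<']
--
--     lines = text.split('\n')
--     start_index = None
--
--     for i, line in enumerate(lines):
--         stripped = line.strip()
--         if any(stripped.startswith(marker) for marker in markers):
--             start_index = i
--             break
--
--     if start_index is None:
--         return text  # No markers found
--
--     # Skip empty lines before first marker
--     while start_index > 0 and not lines[start_index - 1].strip():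
--         start_index -= 1
--
--     return '\n'.join(lines[start_index:])
-- ===== SOURCE B (Python) =====
-- def _remove_preamble(text: str) -> str:
--     """
--     Remove text before first protocol marker
--     Handles: "Sure! Here's...", "I'll help you..."
--     """
--     lines = text.split('\n')
--     run_start = None  # index where the current run of blank lines began
--     for i, line in enumerate(lines):
--         stripped = line.strip()
--         if stripped.startswith('>>') or stripped.startswith('::') or stripped.startswith('<<<'):
--             start = i if run_start is None else run_start
--             return '\n'.join(lines[start:])
--         if stripped:
--             run_start = None
--         elif run_start is None:
--             run_start = i
--     return text  # No markers found
-- ===== Notes on version B (the rewrite author's own statement) =====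
-- stated objective: alternative
-- what changed: Single forward pass that tracks the start of the current blank-line run and returns at the first marker, replacing A's separate backward while-loop over preceding blank lines after the search.
import Mathlib
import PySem

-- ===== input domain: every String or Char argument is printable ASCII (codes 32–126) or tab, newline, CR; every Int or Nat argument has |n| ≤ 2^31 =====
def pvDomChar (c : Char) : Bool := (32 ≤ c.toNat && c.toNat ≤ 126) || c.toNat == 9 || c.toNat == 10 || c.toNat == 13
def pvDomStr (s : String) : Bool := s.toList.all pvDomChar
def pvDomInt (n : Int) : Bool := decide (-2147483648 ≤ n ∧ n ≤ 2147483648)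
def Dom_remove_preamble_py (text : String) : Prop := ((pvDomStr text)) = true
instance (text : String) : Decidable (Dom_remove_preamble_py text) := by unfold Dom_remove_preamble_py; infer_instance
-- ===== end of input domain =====

-- B replaces A's find-then-backward-walk with one forward pass tracking the start of the
-- current blank-line run (objective: alternative decomposition of the same O(n) scan).

-- ===== PORT A =====
-- markers = ['>>', '::', '<<<']
def pvMarkers : List String := [">>", "::", "<<<"]

-- for i, line in enumerate(lines): if any(stripped.startswith(m) for m in markers): start_index = i; break
def pvAFind : List String → Nat → Option Nat
  | [], _ => none
  | l :: rest, i =>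
    let stripped := PySem.Chars.strip l.toList
    if pvMarkers.any (fun m => PySem.Chars.startswith stripped m.toList) then some i
    else pvAFind rest (i + 1)

-- while start_index > 0 and not lines[start_index - 1].strip(): start_index -= 1
-- (the loop only reads in-range indices; getD "" is the in-range access lines[i-1])
def pvABack (lines : List String) : Nat → Nat
  | 0 => 0
  | i + 1 => if (PySem.Chars.strip (lines.getD i "").toList).isEmpty then pvABack lines i else i + 1

-- split? is some for the nonempty separator "\n"; getD [] unwraps it
def remove_preamble_py (text : String) : String :=
  let lines := (PySem.Str.split? text "\n").getD []
  match pvAFind lines 0 with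
  | none => text
  | some i => PySem.Str.join "\n" (lines.drop (pvABack lines i))

-- ===== PORT B =====
-- forward pass: run = index where the current run of blank lines began (None if none)
def pvBLoop (text : String) (lines : List String) : List String → Nat → Option Nat → String
  | [], _, _ => text
  | l :: rest, i, run =>
    let stripped := PySem.Chars.strip l.toList
    if PySem.Chars.startswith stripped ">>".toList
        || PySem.Chars.startswith stripped "::".toList
        || PySem.Chars.startswith stripped "<<<".toList then
      PySem.Str.join "\n" (lines.drop (run.getD i))
    else if !stripped.isEmpty then
      pvBLoop text lines rest (i + 1) none
    else
      pvBLoop text lines rest (i + 1) (if run.isNone then some i else run)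

def remove_preamble_py_alt (text : String) : String :=
  let lines := (PySem.Str.split? text "\n").getD []
  pvBLoop text lines lines 0 none

-- ===== PRECONDITION & SPEC =====
def Spec_remove_preamble_py (text : String) (out : String) : Prop := out = remove_preamble_py_alt text
instance (text : String) (out : String) : Decidable (Spec_remove_preamble_py text out) := by unfold Spec_remove_preamble_py; infer_instance

-- ===== CLAIM (what is proved, stated in full; the proofs are below) =====
def Claim_equal_remove_preamble_py : Prop := ∀ (text : String), Dom_remove_preamble_py text → Spec_remove_preamble_py text (remove_preamble_py text)

-- ===== LEMMAS AND PROOFS =====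

theorem pvBLoop_eq (text : String) (lines : List String) :
    ∀ (rest : List String) (i : Nat) (run : Option Nat),
      lines.drop i = rest → pvABack lines i = run.getD i →
      pvBLoop text lines rest i run =
        match pvAFind rest i with
        | none => text
        | some j => PySem.Str.join "\n" (lines.drop (pvABack lines j)) := by
  intro rest
  induction rest with
  | nil => intro i run _ _; simp [pvBLoop, pvAFind]
  | cons l rest ih =>
    intro i run hdrop hback
    have hget : lines[i]? = some l := by
      have h0 := (List.getElem?_drop (xs := lines) (i := i) (j := 0)).symm
      simpa [hdrop] using h0
    have hdrop' : lines.drop (i + 1) = rest := by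
      have : lines.drop (i + 1) = (lines.drop i).drop 1 := by
        rw [List.drop_drop]
      simp [this, hdrop]
    by_cases hm : (pvMarkers.any (fun m =>
        PySem.Chars.startswith (PySem.Chars.strip l.toList) m.toList)) = true
    · have hm' : (PySem.Chars.startswith (PySem.Chars.strip l.toList) ">>".toList
          || PySem.Chars.startswith (PySem.Chars.strip l.toList) "::".toList
          || PySem.Chars.startswith (PySem.Chars.strip l.toList) "<<<".toList) = true := by
        simpa [pvMarkers, List.any, Bool.or_assoc] using hm
      simp only [pvBLoop, pvAFind, hm, hm', if_pos, hback]
    · have hm' : (PySem.Chars.startswith (PySem.Chars.strip l.toList) ">>".toList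
          || PySem.Chars.startswith (PySem.Chars.strip l.toList) "::".toList
          || PySem.Chars.startswith (PySem.Chars.strip l.toList) "<<<".toList) = false := by
        have := hm
        simp only [pvMarkers, List.any] at this
        simpa [Bool.or_assoc] using eq_false_of_ne_true this
      by_cases hb : (PySem.Chars.strip l.toList).isEmpty = true
      · -- blank line: run extends (or starts here)
        have hback' : pvABack lines (i + 1) = ((if run.isNone then some i else run).getD (i + 1)) := by
          have : pvABack lines (i + 1) = pvABack lines i := by
            simp [pvABack, List.getD, hget, hb]
          rw [this, hback]
          cases run <;> simp
        have := ih (i + 1) (if run.isNone then some i else run) hdrop' hback'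
        simp only [pvBLoop, pvAFind, hm, hm', hb]
        simpa using this
      · -- non-blank, non-marker line: run resets
        have hback' : pvABack lines (i + 1) = ((none : Option Nat).getD (i + 1)) := by
          simp [pvABack, List.getD, hget, hb]
        have := ih (i + 1) none hdrop' hback'
        simp only [pvBLoop, pvAFind, hm, hm', hb]
        simpa [hb] using this

-- ===== VERDICT (by name: the statement is the Claim_ definition above) =====
theorem remove_preamble_py_spec : Claim_equal_remove_preamble_py := by
  intro text _
  unfold Spec_remove_preamble_py remove_preamble_py remove_preamble_py_alt
  rw [pvBLoop_eq text ((PySem.Str.split? text "\n").getD []) ((PySem.Str.split? text "\n").getD []) 0 none rfl rfl]
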